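-- pv_equiv track=rewrite | github.com/devmatrix-ai/devmatrix-mvp | src/services/task_executor.py | _parse_multifile_code
-- ===== SOURCE A (Python) =====
-- from typing import Dict, Any, List, Optional
--
-- def _parse_multifile_code(code: str) -> Dict[str, str]:
--     """Parse multi-file code output."""
--     files = {}
--     current_file = None
--     current_code = []
--
--     for line in code.split('\n'):
--         if line.startswith("# File:"):
--             # Save previous file
--             if current_file:
--                 files[current_file] = '\n'.join(current_code).strip()
--
--             # Start new file
--             current_file = line.replace("# File:", "").strip()
--             current_code = []
--         else:
--             if current_file:
--                 current_code.append(line)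
--
--     # Save last file
--     if current_file:
--         files[current_file] = '\n'.join(current_code).strip()
--
--     return files
-- ===== SOURCE B (Python) =====
-- def _parse_multifile_code(code: str) -> dict:
--     """Parse multi-file code output (scan by header positions instead of a stateful line loop)."""
--     files = {}
--     lines = code.split('\n')
--     n = len(lines)
--     i = 0
--     # skip preamble before the first header
--     while i < n and not lines[i].startswith("# File:"):
--         i += 1
--     while i < n:
--         name = lines[i].replace("# File:", "").strip()
--         j = i + 1
--         while j < n and not lines[j].startswith("# File:"):
--             j += 1
--         if name:
--             files[name] = '\n'.join(lines[i + 1:j]).strip()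
--         i = j
--     return files
-- ===== Notes on version B (the rewrite author's own statement) =====
-- stated objective: alternative
-- what changed: Replaces A's single stateful line loop (current_file/current_code accumulator with save-on-next-header and a final flush) with a header-position scan: skip the preamble, then for each header line take the body as the span of lines up to the next header and assign it directly.
import Mathlib
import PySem

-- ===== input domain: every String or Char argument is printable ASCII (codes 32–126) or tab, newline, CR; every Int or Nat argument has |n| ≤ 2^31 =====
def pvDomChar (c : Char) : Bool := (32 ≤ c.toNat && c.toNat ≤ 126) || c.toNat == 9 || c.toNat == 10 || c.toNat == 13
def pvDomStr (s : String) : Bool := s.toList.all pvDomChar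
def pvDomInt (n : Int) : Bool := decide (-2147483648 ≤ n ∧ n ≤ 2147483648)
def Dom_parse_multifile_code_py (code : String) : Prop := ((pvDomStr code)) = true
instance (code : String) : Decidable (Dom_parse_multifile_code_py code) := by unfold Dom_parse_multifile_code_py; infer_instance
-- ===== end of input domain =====

-- B replaces A's stateful current_file/current_code line loop with a header-position scan
-- (skip the preamble, then for each '# File:' header take the body span up to the next
-- header); objective: a different decomposition of the same linear-time parse.

-- code.split('\n'): split? is some whenever the separator is nonempty, so getD [] never fires
def pmfLines (code : String) : List String := (PySem.Str.split? code "\n").getD []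

-- ===== PORT A =====
-- current_file is modelled as a String with "" for Python's None: A uses the two only
-- through truthiness ('if current_file:'), where None and "" behave identically.
def pmfStepA (st : PySem.Dict String String × String × List String) (line : String) :
    PySem.Dict String String × String × List String :=
  if PySem.Str.startswith line "# File:" then
    let files := if st.2.1 ≠ "" then st.1.insert st.2.1 (PySem.Str.strip (PySem.Str.join "\n" st.2.2)) else st.1
    (files, PySem.Str.strip (PySem.Str.replace line "# File:" ""), [])
  else
    if st.2.1 ≠ "" then (st.1, st.2.1, st.2.2 ++ [line]) else st

def parse_multifile_code_py (code : String) : List (String × String) :=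
  let st := (pmfLines code).foldl pmfStepA (PySem.Dict.empty, "", [])
  (if st.2.1 ≠ "" then st.1.insert st.2.1 (PySem.Str.strip (PySem.Str.join "\n" st.2.2)) else st.1).items

-- ===== PORT B =====
def pmfIsHeader (l : String) : Bool := PySem.Str.startswith l "# File:"

-- outer loop of Source B: at a header, take the body span up to the next header and continue
-- there; the non-header branch is Source B's skip loops (preamble skip / span advance)
def pmfGo : List String → PySem.Dict String String → PySem.Dict String String
  | [], files => files
  | l :: rest, files =>
    if pmfIsHeader l then
      let name := PySem.Str.strip (PySem.Str.replace l "# File:" "")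
      let body := rest.takeWhile (fun x => !pmfIsHeader x)
      let rest' := rest.dropWhile (fun x => !pmfIsHeader x)
      pmfGo rest' (if name ≠ "" then files.insert name (PySem.Str.strip (PySem.Str.join "\n" body)) else files)
    else pmfGo rest files
termination_by ls _ => ls.length
decreasing_by
  · exact Nat.lt_succ_of_le (List.length_dropWhile_le _ _)
  · exact Nat.lt_succ_self _

def parse_multifile_code_py_alt (code : String) : List (String × String) :=
  (pmfGo (pmfLines code) PySem.Dict.empty).items

-- ===== PRECONDITION & SPEC =====
def Spec_parse_multifile_code_py (code : String) (out : List (String × String)) : Prop := out = parse_multifile_code_py_alt code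
instance (code : String) (out : List (String × String)) : Decidable (Spec_parse_multifile_code_py code out) := by unfold Spec_parse_multifile_code_py; infer_instance

-- ===== CLAIM (what is proved, stated in full; the proofs are below) =====
def Claim_equal_parse_multifile_code_py : Prop := ∀ (code : String), Dom_parse_multifile_code_py code → Spec_parse_multifile_code_py code (parse_multifile_code_py code)

-- ===== LEMMAS AND PROOFS =====

-- proof-only abbreviations: A's filename expression and A's 'save pending file' expression
def pmfName (l : String) : String := PySem.Str.strip (PySem.Str.replace l "# File:" "")
def pmfSave (files : PySem.Dict String String) (cf : String) (acc : List String) : PySem.Dict String String :=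
  if cf ≠ "" then files.insert cf (PySem.Str.strip (PySem.Str.join "\n" acc)) else files

theorem stepA_header {l : String} (files : PySem.Dict String String) (cf : String) (acc : List String)
    (h : pmfIsHeader l = true) : pmfStepA (files, cf, acc) l = (pmfSave files cf acc, pmfName l, []) := by
  have h' : PySem.Str.startswith l "# File:" = true := h
  simp only [pmfStepA, pmfSave, pmfName, h', if_true]

theorem stepA_skip {l : String} (files : PySem.Dict String String) {cf : String} (acc : List String)
    (h : pmfIsHeader l = false) (hcf : cf = "") : pmfStepA (files, cf, acc) l = (files, cf, acc) := by
  have h' : PySem.Str.startswith l "# File:" = false := h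
  simp only [pmfStepA, h']
  simp [hcf]

theorem stepA_app {l : String} (files : PySem.Dict String String) {cf : String} (acc : List String)
    (h : pmfIsHeader l = false) (hcf : cf ≠ "") : pmfStepA (files, cf, acc) l = (files, cf, acc ++ [l]) := by
  have h' : PySem.Str.startswith l "# File:" = false := h
  simp only [pmfStepA, h']
  simp [hcf]

theorem pmfGo_cons_header {l : String} (rest : List String) (files : PySem.Dict String String)
    (h : pmfIsHeader l = true) :
    pmfGo (l :: rest) files =
      pmfGo (rest.dropWhile (fun x => !pmfIsHeader x))
        (if pmfName l ≠ "" then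
          files.insert (pmfName l) (PySem.Str.strip (PySem.Str.join "\n" (rest.takeWhile (fun x => !pmfIsHeader x))))
         else files) := by
  rw [pmfGo]
  simp [h, pmfName]

theorem pmfGo_cons_nonheader {l : String} (rest : List String) (files : PySem.Dict String String)
    (h : pmfIsHeader l = false) : pmfGo (l :: rest) files = pmfGo rest files := by
  rw [pmfGo]
  simp [h]

-- pmfGo ignores non-header lines at the front
theorem pmfGo_dropWhile (ls : List String) (files : PySem.Dict String String) :
    pmfGo ls files = pmfGo (ls.dropWhile (fun x => !pmfIsHeader x)) files := by
  induction ls with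
  | nil => rfl
  | cons l rest ih =>
    by_cases h : pmfIsHeader l = true
    · simp [h]
    · simp only [Bool.not_eq_true] at h
      rw [pmfGo_cons_nonheader rest files h, List.dropWhile_cons]
      simp [h, ih]

-- the loop invariant: finalizing A's fold state equals running B's scan on the remaining
-- lines, with any pending (truthy) file saved together with the body span still ahead.
theorem pmfInv (ls : List String) (files : PySem.Dict String String) (cf : String) (acc : List String) :
    pmfSave (ls.foldl pmfStepA (files, cf, acc)).1 (ls.foldl pmfStepA (files, cf, acc)).2.1
        (ls.foldl pmfStepA (files, cf, acc)).2.2 =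
    (if cf = "" then pmfGo ls files
     else pmfGo (ls.dropWhile (fun x => !pmfIsHeader x))
        (files.insert cf (PySem.Str.strip (PySem.Str.join "\n" (acc ++ ls.takeWhile (fun x => !pmfIsHeader x)))))) := by
  induction ls generalizing files cf acc with
  | nil =>
    by_cases hcf : cf = "" <;> simp [pmfSave, pmfGo, hcf]
  | cons l rest ih =>
    by_cases hh : pmfIsHeader l = true
    · rw [List.foldl_cons, stepA_header files cf acc hh, ih]
      by_cases hcf : cf = ""
      · rw [if_pos hcf, pmfGo_cons_header rest files hh]
        have hs : pmfSave files cf acc = files := by simp [pmfSave, hcf]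
        rw [hs]
        by_cases hn : pmfName l = ""
        · rw [if_pos hn, if_neg (by simp [hn]), pmfGo_dropWhile rest files]
        · rw [if_neg hn, if_pos hn]
          simp
      · have hd : (l :: rest).dropWhile (fun x => !pmfIsHeader x) = l :: rest := by
          simp [hh]
        have ht : (l :: rest).takeWhile (fun x => !pmfIsHeader x) = ([] : List String) := by
          simp [hh]
        have hs : pmfSave files cf acc = files.insert cf (PySem.Str.strip (PySem.Str.join "\n" acc)) := by
          simp [pmfSave, hcf]
        rw [if_neg hcf, hd, ht, List.append_nil, hs,
            pmfGo_cons_header rest (files.insert cf (PySem.Str.strip (PySem.Str.join "\n" acc))) hh]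
        by_cases hn : pmfName l = ""
        · rw [if_pos hn, if_neg (by simp [hn])]
          exact pmfGo_dropWhile rest _
        · rw [if_neg hn, if_pos hn]
          simp
    · simp only [Bool.not_eq_true] at hh
      have hd : (l :: rest).dropWhile (fun x => !pmfIsHeader x) = rest.dropWhile (fun x => !pmfIsHeader x) := by
        simp [hh]
      have ht : (l :: rest).takeWhile (fun x => !pmfIsHeader x) = l :: rest.takeWhile (fun x => !pmfIsHeader x) := by
        simp [hh]
      by_cases hcf : cf = ""
      · rw [List.foldl_cons, stepA_skip files acc hh hcf, ih, if_pos hcf, if_pos hcf,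
            pmfGo_cons_nonheader rest files hh]
      · rw [List.foldl_cons, stepA_app files acc hh hcf, ih, if_neg hcf, if_neg hcf, hd, ht]
        simp

-- ===== VERDICT (by name: the statement is the Claim_ definition above) =====
theorem parse_multifile_code_py_spec : Claim_equal_parse_multifile_code_py := by
  intro code _
  unfold Spec_parse_multifile_code_py parse_multifile_code_py parse_multifile_code_py_alt
  have h := pmfInv (pmfLines code) PySem.Dict.empty "" []
  rw [if_pos rfl] at h
  simp only [pmfSave] at h
  simp only [h]
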